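-- pv_equiv track=rewrite | github.com/Jmarsaj/AlgoMonster | squareRootEstimation.py | squareRootEstimation
-- ===== SOURCE A (Python) =====
-- def squareRootEstimation(n):
-- 	left, right = 1, n-1
-- 	res = -1
-- 	while (left<=right):
-- 		mid = (left+right) // 2
-- 		if mid*mid == n:
-- 			return mid
-- 		elif mid*mid > n:
-- 			res = mid
-- 			right = mid - 1
-- 		else:
-- 			left = mid + 1
-- 	return res - 1
-- ===== SOURCE B (Python) =====
-- def squareRootEstimation(n):
-- 	for i in range(1, n):
-- 		if i*i == n:
-- 			return i
-- 		if i*i > n: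
-- 			return i - 1
-- 	return -2
-- ===== Notes on version B (the rewrite author's own statement) =====
-- stated objective: simpler
-- what changed: Replaces the binary search over [1, n-1] with a single linear scan i = 1..n-1 that returns i on i*i == n, i-1 at the first i with i*i > n, and -2 if the range is exhausted (n < 3).
import Mathlib
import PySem

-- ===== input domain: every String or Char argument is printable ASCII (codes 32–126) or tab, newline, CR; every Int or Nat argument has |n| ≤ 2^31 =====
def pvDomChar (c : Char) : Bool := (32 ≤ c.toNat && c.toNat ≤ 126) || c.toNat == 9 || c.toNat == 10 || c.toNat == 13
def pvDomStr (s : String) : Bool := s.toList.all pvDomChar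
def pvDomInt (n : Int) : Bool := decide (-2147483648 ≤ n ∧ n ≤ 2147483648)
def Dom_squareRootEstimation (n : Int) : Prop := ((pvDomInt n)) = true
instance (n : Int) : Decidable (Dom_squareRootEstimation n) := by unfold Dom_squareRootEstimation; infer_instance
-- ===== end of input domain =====

-- B replaces A's binary search by a single linear scan over range(1, n); objective: simpler.

-- ===== PORT A =====
-- the while-loop of A, state (left, right, res)
def sqrtLoopA (n left right res : Int) : Int :=
  if h : left ≤ right then
    let mid := PySem.Int.floordiv (left + right) 2
    if mid * mid = n then mid
    else if mid * mid > n then sqrtLoopA n left (mid - 1) mid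
    else sqrtLoopA n (mid + 1) right res
  else res - 1
termination_by (right + 1 - left).toNat
decreasing_by
  · have := PySem.Int.floordiv_two_mid_bounds h; omega
  · have := PySem.Int.floordiv_two_mid_bounds h; omega

def squareRootEstimation (n : Int) : Int := sqrtLoopA n 1 (n - 1) (-1)

-- ===== PORT B =====
-- the for-loop of B over the remaining part of range(1, n)
def sqrtLoopB (n : Int) : List Int → Int
  | [] => -2
  | i :: rest => if i * i = n then i else if i * i > n then i - 1 else sqrtLoopB n rest

def squareRootEstimation_alt (n : Int) : Int := sqrtLoopB n (PySem.List.pyRange 1 n 1)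

-- ===== PRECONDITION & SPEC =====
def Spec_squareRootEstimation (n : Int) (out : Int) : Prop := out = squareRootEstimation_alt n
instance (n : Int) (out : Int) : Decidable (Spec_squareRootEstimation n out) := by unfold Spec_squareRootEstimation; infer_instance

-- ===== CLAIM (what is proved, stated in full; the proofs are below) =====
def Claim_equal_squareRootEstimation : Prop := ∀ (n : Int), Dom_squareRootEstimation n → Spec_squareRootEstimation n (squareRootEstimation n)

-- ===== LEMMAS AND PROOFS =====

-- both loops, for n ≥ 3, return the unique r with 1 ≤ r ∧ r² ≤ n < (r+1)²
def SqrtPin (n r : Int) : Prop := 1 ≤ r ∧ r * r ≤ n ∧ n < (r + 1) * (r + 1)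

theorem sqrtPin_unique {n r₁ r₂ : Int} (h₁ : SqrtPin n r₁) (h₂ : SqrtPin n r₂) : r₁ = r₂ := by
  obtain ⟨a1, a2, a3⟩ := h₁; obtain ⟨b1, b2, b3⟩ := h₂
  by_contra hne
  rcases lt_or_gt_of_ne hne with h | h
  · nlinarith
  · nlinarith

theorem sqrtLoopB_pin (n : Int) (hn : 3 ≤ n) :
    ∀ (k : Int), 1 ≤ k → (k - 1) * (k - 1) < n →
      SqrtPin n (sqrtLoopB n (PySem.List.pyRange k n 1)) := by
  have H : ∀ (m : Nat) (k : Int), (n - k).toNat ≤ m → 1 ≤ k → (k - 1) * (k - 1) < n →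
      SqrtPin n (sqrtLoopB n (PySem.List.pyRange k n 1)) := by
    intro m
    induction m with
    | zero =>
      intro k hm hk hsq
      exfalso
      have hkn : n ≤ k := by omega
      nlinarith
    | succ m ih =>
      intro k hm hk hsq
      by_cases hlt : k < n
      · rw [PySem.List.pyRange_one_cons hlt]
        unfold sqrtLoopB
        by_cases he : k * k = n
        · rw [if_pos he]
          exact ⟨hk, le_of_eq he, by nlinarith⟩
        · rw [if_neg he]
          by_cases hgt : k * k > n
          · rw [if_pos hgt]
            have hk2 : 2 ≤ k := by nlinarith
            exact ⟨by omega, by nlinarith, by nlinarith⟩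
          · rw [if_neg hgt]
            have hklt : k * k < n := lt_of_le_of_ne (not_lt.mp hgt) he
            exact ih (k + 1) (by omega) (by omega) (by simpa using hklt)
      · exfalso
        have hkn : n ≤ k := by omega
        nlinarith
  intro k hk hsq
  exact H (n - k).toNat k le_rfl hk hsq

theorem sqrtLoopA_pin (n : Int) (hn : 3 ≤ n) :
    ∀ (m : Nat) (left right res : Int), (right + 1 - left).toNat ≤ m →
      1 ≤ left → (left - 1) * (left - 1) < n →
      ((res = -1 ∧ right = n - 1) ∨ (1 ≤ res ∧ n < res * res ∧ right = res - 1)) →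
      SqrtPin n (sqrtLoopA n left right res) := by
  intro m
  induction m with
  | zero =>
    intro left right res hm h1 hsq hinv
    have hlr : ¬ left ≤ right := by omega
    rw [sqrtLoopA, dif_neg hlr]
    rcases hinv with ⟨_, hr⟩ | ⟨hres1, hresq, hr⟩
    · exfalso; nlinarith [hm, hr]
    · have hres2 : 2 ≤ res := by nlinarith
      have hle : res - 1 ≤ left - 1 := by omega
      exact ⟨by omega, by nlinarith, by nlinarith⟩
  | succ m ih =>
    intro left right res hm h1 hsq hinv
    by_cases hlr : left ≤ right
    · rw [sqrtLoopA, dif_pos hlr]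
      obtain ⟨hml, hmr⟩ := PySem.Int.floordiv_two_mid_bounds hlr
      set mid := PySem.Int.floordiv (left + right) 2 with hmid
      simp only
      by_cases he : mid * mid = n
      · rw [if_pos he]
        exact ⟨by omega, le_of_eq he, by nlinarith⟩
      · rw [if_neg he]
        by_cases hgt : mid * mid > n
        · rw [if_pos hgt]
          exact ih left (mid - 1) mid (by omega) h1 hsq (Or.inr ⟨by omega, hgt, rfl⟩)
        · rw [if_neg hgt]
          have hklt : mid * mid < n := lt_of_le_of_ne (not_lt.mp hgt) he
          exact ih (mid + 1) right res (by omega) (by omega) (by simpa using hklt) hinv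
    · rw [sqrtLoopA, dif_neg hlr]
      rcases hinv with ⟨_, hr⟩ | ⟨hres1, hresq, hr⟩
      · exfalso; nlinarith [hr]
      · have hres2 : 2 ≤ res := by nlinarith
        have hle : res - 1 ≤ left - 1 := by omega
        exact ⟨by omega, by nlinarith, by nlinarith⟩

-- ===== VERDICT (by name: the statement is the Claim_ definition above) =====
theorem squareRootEstimation_spec : Claim_equal_squareRootEstimation := by
  unfold Claim_equal_squareRootEstimation Spec_squareRootEstimation
  intro n _
  by_cases hn : 3 ≤ n
  · have hA := sqrtLoopA_pin n hn (n - 1 + 1 - 1).toNat 1 (n - 1) (-1) le_rfl le_rfl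
      (by nlinarith) (Or.inl ⟨rfl, rfl⟩)
    have hB := sqrtLoopB_pin n hn 1 le_rfl (by nlinarith)
    exact sqrtPin_unique hA hB
  · by_cases h2 : n = 2
    · subst h2
      have hA : squareRootEstimation 2 = -2 := by
        unfold squareRootEstimation
        rw [sqrtLoopA, dif_pos (by norm_num : (1:Int) ≤ 2 - 1)]
        norm_num [PySem.Int.floordiv, Int.fdiv]
        rw [sqrtLoopA]
        norm_num
      have hB : squareRootEstimation_alt 2 = -2 := by decide
      rw [hA, hB]
    · have hle : n ≤ 1 := by omega
      have hA : squareRootEstimation n = -2 := by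
        unfold squareRootEstimation
        rw [sqrtLoopA, dif_neg (by omega : ¬ (1 : Int) ≤ n - 1)]
        norm_num
      have hB : squareRootEstimation_alt n = -2 := by
        unfold squareRootEstimation_alt
        rw [PySem.List.pyRange_one_eq_nil (by omega : n ≤ 1)]
        rfl
      rw [hA, hB]
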